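-- pv_equiv track=rewrite | github.com/ivan-ngchakming/amazon | request_wait_time.py | solve
-- ===== SOURCE A (Python) =====
-- def solve(wait_time):
--     res = [len(wait_time)]
--
--     for i in range(1, len(wait_time)):
--         for j in range(i, len(wait_time)):
--             wait_time[j] -= 1
--         active = sum(1 for t in wait_time[i:] if t > 0)
--         if active == 0:
--             return res
--         res.append(active)
--     return res
-- ===== SOURCE B (Python) =====
-- def solve(wait_time):
--     # O(n) counting re-implementation; A mutates wait_time in place, B does not
--     # (the equivalence is about the return value).
--     n = len(wait_time)
--     cnt = [0] * (n + 1)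
--     total = 0
--     for j, t in enumerate(wait_time):
--         m = min(j, t - 1)
--         if m >= 1:
--             cnt[m] += 1
--             total += 1
--     res = [n]
--     for i in range(1, n):
--         if total == 0:
--             break
--         res.append(total)
--         total -= cnt[i]
--     return res
-- ===== Notes on version B (the rewrite author's own statement) =====
-- stated objective: faster
-- what changed: Instead of simulating every step by decrementing all remaining timers and rescanning the tail (A), B computes for each timer j its last active step m_j = min(j, a[j]-1) in one pass, tallies them in a counting array, and emits the per-step active counts with a running total decreased by cnt[i]; A also mutates its argument in place while B does not.
import Mathlib
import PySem

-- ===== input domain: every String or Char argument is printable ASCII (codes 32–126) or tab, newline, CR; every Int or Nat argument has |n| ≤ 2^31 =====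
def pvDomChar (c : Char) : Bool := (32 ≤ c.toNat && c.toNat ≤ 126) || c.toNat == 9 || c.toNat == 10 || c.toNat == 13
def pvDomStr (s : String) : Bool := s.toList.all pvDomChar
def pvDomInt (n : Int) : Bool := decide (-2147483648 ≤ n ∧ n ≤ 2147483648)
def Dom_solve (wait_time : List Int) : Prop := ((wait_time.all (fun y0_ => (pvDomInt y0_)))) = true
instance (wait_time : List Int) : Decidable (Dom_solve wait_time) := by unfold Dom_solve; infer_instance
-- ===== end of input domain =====

-- B replaces A's quadratic simulate-and-count loop by a linear counting pass; A mutates its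
-- argument in place and B does not, so the equivalence proved here is about the return value only.

-- ===== PORT A =====
-- inner loop body: wait_time[j] -= 1 (the index is always in range when called)
def solveDecStep (w : List Int) (j : Int) : List Int :=
  PySem.List.pySetD w j (PySem.List.pyGetD w j 0 - 1)

-- the for-i loop of A, with the early return on active == 0
def solveLoopA (n : Nat) (i : Nat) (wt res : List Int) : List Int :=
  if i < n then
    let wt' := (PySem.List.pyRange (i : Int) (n : Int) 1).foldl solveDecStep wt
    let active : Int :=
      ((PySem.List.slice wt' (some (i : Int)) none).map (fun t => if 0 < t then (1 : Int) else 0)).sum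
    if active = 0 then res
    else solveLoopA n (i + 1) wt' (res ++ [active])
  else res
  termination_by n - i

def solve (wait_time : List Int) : List Int :=
  solveLoopA wait_time.length 1 wait_time [(wait_time.length : Int)]

-- ===== PORT B =====
-- counting pass of B: for each (j, t), m = min(j, t - 1); if m >= 1 then cnt[m] += 1, total += 1
def solveCntStep (st : List Int × Int) (p : Int × Int) : List Int × Int :=
  let m := min p.1 (p.2 - 1)
  if 1 ≤ m then (PySem.List.pySetD st.1 m (PySem.List.pyGetD st.1 m 0 + 1), st.2 + 1)
  else st

-- output loop of B: append total while it is nonzero, then total -= cnt[i]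
def solveLoopB (n : Nat) (i : Nat) (cnt : List Int) (total : Int) (res : List Int) : List Int :=
  if i < n then
    if total = 0 then res
    else solveLoopB n (i + 1) cnt (total - PySem.List.pyGetD cnt (i : Int) 0) (res ++ [total])
  else res
  termination_by n - i

def solve_alt (wait_time : List Int) : List Int :=
  let n := wait_time.length
  let ct := (PySem.List.enumerate wait_time 0).foldl solveCntStep (List.replicate (n + 1) 0, 0)
  solveLoopB n 1 ct.1 ct.2 [(n : Int)]

-- ===== PRECONDITION & SPEC =====
def Spec_solve (wait_time : List Int) (out : List Int) : Prop := out = solve_alt wait_time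
instance (wait_time : List Int) (out : List Int) : Decidable (Spec_solve wait_time out) := by unfold Spec_solve; infer_instance

-- ===== CLAIM (what is proved, stated in full; the proofs are below) =====
def Claim_equal_solve : Prop := ∀ (wait_time : List Int), Dom_solve wait_time → Spec_solve wait_time (solve wait_time)

-- ===== LEMMAS AND PROOFS =====
-- m-value of an enumerated entry (j, t): the last step index i ≥ 1 at which it is still active
def solveMval (p : Int × Int) : Int := min p.1 (p.2 - 1)

-- common reference loop: at step i the number of active timers is #{ j ≥ i : a[j] > i }
def solveLoopPure (a : List Int) (i : Nat) (res : List Int) : List Int :=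
  if i < a.length then
    let act := (a.drop i).countP (fun t => decide ((i : Int) < t))
    if act = 0 then res
    else solveLoopPure a (i + 1) (res ++ [(act : Int)])
  else res
  termination_by a.length - i

lemma decFold_aux (n : Nat) : ∀ (k i : Nat) (w : List Int), w.length = n → i + k = n →
    (PySem.List.pyRange (i : Int) (n : Int) 1).foldl solveDecStep w
      = w.take i ++ (w.drop i).map (fun t => t - 1) := by
  intro k
  induction k with
  | zero =>
    intro i w hw hi
    rw [PySem.List.pyRange_one_eq_nil (by exact_mod_cast by omega : (n:Int) ≤ (i:Int))]
    simp [List.take_of_length_le (by omega : w.length ≤ i),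
      List.drop_eq_nil_of_le (by omega : w.length ≤ i)]
  | succ k ih =>
    intro i w hw hi
    rw [PySem.List.pyRange_one_cons (by exact_mod_cast by omega : (i:Int) < (n:Int))]
    simp only [List.foldl_cons]
    have hstep : solveDecStep w (i:Int) = w.set i (w.getD i 0 - 1) := by
      simp [solveDecStep, pysem]
    rw [hstep]
    have hlen : (w.set i (w.getD i 0 - 1)).length = n := by simp [hw]
    have hc : ((i:Int) + 1) = ((i+1 : Nat) : Int) := by push_cast; ring
    rw [hc, ih (i+1) _ hlen (by omega)]
    have hi' : i < w.length := by omega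
    have hgd : w.getD i 0 = w[i] := by rw [List.getD_eq_getElem?_getD]; simp [hi']
    have hset : w.set i (w.getD i 0 - 1) = w.take i ++ (w.getD i 0 - 1) :: w.drop (i+1) := by
      rw [List.set_eq_take_append_cons_drop]; simp [hi']
    rw [hset, List.drop_eq_getElem_cons hi']
    have hlt : (w.take i).length = i := by simp; omega
    simp [List.take_append, List.drop_append, hlt, List.take_take]
    have hm : i < (List.map (fun t : Int => t - 1) w).length := by simpa
    rw [List.drop_eq_nil_of_le (by simp), List.nil_append,
      List.drop_eq_getElem_cons hm]
    simp [hi']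

lemma loopA_eq (a : List Int) : ∀ (k i : Nat) (wt res : List Int), a.length - i ≤ k →
    wt.length = a.length →
    wt.drop i = (a.drop i).map (fun t => t - ((i : Int) - 1)) →
    solveLoopA a.length i wt res = solveLoopPure a i res := by
  intro k
  induction k with
  | zero =>
    intro i wt res hk hlen hdrop
    rw [solveLoopA, solveLoopPure]
    simp [Nat.not_lt.mpr (by omega : a.length ≤ i)]
  | succ k ih =>
    intro i wt res hk hlen hdrop
    rw [solveLoopA, solveLoopPure]
    by_cases hin : i < a.length
    · simp only [hin, if_pos]
      have hfold := decFold_aux a.length (a.length - i) i wt hlen (by omega)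
      set wt' := (PySem.List.pyRange (i : Int) (a.length : Int) 1).foldl solveDecStep wt with hwt'
      have hdi : wt'.drop i = (a.drop i).map (fun t => t - (i : Int)) := by
        rw [hfold]
        have h1 : (wt.take i).length = i := by simp; omega
        rw [List.drop_append_of_le_length (by omega), List.drop_eq_nil_of_le (by omega),
          List.nil_append]
        rw [hdrop, List.map_map]
        congr 1
        funext t
        simp
        ring
      have hslice : PySem.List.slice wt' (some (i : Int)) none = wt'.drop i :=
        PySem.List.slice_from_natCast wt' i
      have hact : ((PySem.List.slice wt' (some (i : Int)) none).map
            (fun t => if 0 < t then (1 : Int) else 0)).sum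
          = ((a.drop i).countP (fun t => decide ((i : Int) < t)) : Int) := by
        rw [hslice, hdi, PySem.List.sum_map_ite_one_zero' (0 < ·), List.countP_map]
        congr 1
        apply List.countP_congr
        intro t _
        simp [Int.sub_pos]
      rw [hact]
      have hcast : (((a.drop i).countP (fun t => decide ((i : Int) < t)) : Int) = 0)
          ↔ ((a.drop i).countP (fun t => decide ((i : Int) < t)) = 0) := by
        exact_mod_cast Int.natCast_eq_zero
      by_cases hz : (a.drop i).countP (fun t => decide ((i : Int) < t)) = 0
      · simp [hz]
      · rw [if_neg (fun h => hz (hcast.mp h)), if_neg hz]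
        apply ih
        · omega
        · rw [hfold]; simp; omega
        · have : wt'.drop (i+1) = (wt'.drop i).drop 1 := by
            rw [List.drop_drop]
          rw [this, hdi, ← List.map_drop, List.drop_drop]
          congr 1
          funext t
          push_cast
          ring
    · simp [hin]

lemma enumCount_ge (a : List Int) : ∀ (s i : Nat), i ≤ s →
    (PySem.List.enumerate a (s : Int)).countP (fun p => decide ((i : Int) ≤ solveMval p))
      = a.countP (fun t => decide ((i : Int) < t)) := by
  induction a with
  | nil => intro s i h; simp [PySem.List.enumerate_nil]
  | cons x xs ih =>
    intro s i h
    rw [PySem.List.enumerate_cons]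
    have hc : ((s : Int) + 1) = ((s + 1 : Nat) : Int) := by push_cast; ring
    simp only [List.countP_cons, hc, ih (s+1) i (by omega)]
    have : ((i : Int) ≤ solveMval ((s : Int), x)) ↔ ((i : Int) < x) := by
      simp only [solveMval]
      constructor
      · intro hm; have := le_min_iff.mp hm; omega
      · intro hx; apply le_min_iff.mpr; constructor <;> [exact_mod_cast h; omega]
    by_cases hx : (i : Int) < x
    · simp [hx, this.mpr hx]
    · rw [if_neg (by simpa using fun hm => hx (this.mp hm))]
      simp [hx]

lemma enumCount_drop (a : List Int) : ∀ (s i : Nat),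
    (PySem.List.enumerate a (s : Int)).countP (fun p => decide ((i : Int) ≤ solveMval p))
      = (a.drop (i - s)).countP (fun t => decide ((i : Int) < t)) := by
  induction a with
  | nil => intro s i; simp [PySem.List.enumerate_nil]
  | cons x xs ih =>
    intro s i
    by_cases h : i ≤ s
    · rw [enumCount_ge _ s i h, Nat.sub_eq_zero_of_le h, List.drop_zero]
    · rw [PySem.List.enumerate_cons]
      have hc : ((s : Int) + 1) = ((s + 1 : Nat) : Int) := by push_cast; ring
      have hhead : ¬ ((i : Int) ≤ solveMval ((s : Int), x)) := by
        simp only [solveMval]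
        intro hm
        have := le_min_iff.mp hm
        omega
      simp only [List.countP_cons, hc, ih (s+1) i, hhead]
      have : i - s = (i - (s+1)) + 1 := by omega
      rw [this]
      simp

lemma count_mval_split (l : List (Int × Int)) (i : Int) :
    l.countP (fun p => decide (i ≤ solveMval p))
      = l.countP (fun p => decide (i + 1 ≤ solveMval p))
        + l.countP (fun p => decide (solveMval p = i)) := by
  induction l with
  | nil => simp
  | cons x l ih =>
    simp only [List.countP_cons, ih]
    by_cases h1 : i ≤ solveMval x <;> by_cases h2 : solveMval x = i <;>
      by_cases h3 : i + 1 ≤ solveMval x <;> simp [h1, h2, h3] <;> omega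

lemma foldB_spec (xs : List Int) : ∀ (s : Nat) (c : List Int) (tot : Int),
    s + xs.length ≤ c.length →
    (((PySem.List.enumerate xs (s : Int)).foldl solveCntStep (c, tot)).1.length = c.length
    ∧ ((PySem.List.enumerate xs (s : Int)).foldl solveCntStep (c, tot)).2
        = tot + ((PySem.List.enumerate xs (s : Int)).countP
            (fun p => decide ((1:Int) ≤ solveMval p)) : Int)
    ∧ ∀ k : Int, 0 ≤ k →
        PySem.List.pyGetD ((PySem.List.enumerate xs (s : Int)).foldl solveCntStep (c, tot)).1 k 0
          = PySem.List.pyGetD c k 0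
            + ((PySem.List.enumerate xs (s : Int)).countP
                (fun p => decide ((1:Int) ≤ solveMval p ∧ solveMval p = k)) : Int)) := by
  induction xs with
  | nil => intro s c tot h; simp [PySem.List.enumerate_nil]
  | cons x xs ih =>
    intro s c tot h
    rw [PySem.List.enumerate_cons]
    have hc : ((s : Int) + 1) = ((s + 1 : Nat) : Int) := by push_cast; ring
    simp only [List.foldl_cons, hc]
    by_cases hm : (1 : Int) ≤ min (s : Int) (x - 1)
    · set m : Int := min (s : Int) (x - 1) with hmdef
      have hm0 : 0 ≤ m := by omega
      have hmlt : m.toNat < c.length := by simp [List.length_cons] at h; omega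
      have hset : PySem.List.pySetD c m (PySem.List.pyGetD c m 0 + 1)
          = c.set m.toNat (PySem.List.pyGetD c m 0 + 1) :=
        PySem.List.pySetD_of_nonneg (xs := c) (i := m) (v := PySem.List.pyGetD c m 0 + 1) hm0
      have hstep : solveCntStep (c, tot) ((s : Int), x)
          = (c.set m.toNat (PySem.List.pyGetD c m 0 + 1), tot + 1) := by
        rw [← hset]; simp [solveCntStep, ← hmdef, hm]
      rw [hstep]
      obtain ⟨ihl, iht, ihk⟩ := ih (s+1) (c.set m.toNat (PySem.List.pyGetD c m 0 + 1)) (tot+1)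
        (by simp [List.length_cons] at h ⊢; omega)
      refine ⟨by rw [ihl]; simp, ?_, ?_⟩
      · rw [iht]
        have hhead : ((1:Int) ≤ solveMval ((s : Int), x)) := hm
        simp only [List.countP_cons, hhead]
        simp [solveMval] at hhead
        simp [solveMval]
        omega
      · intro k hk
        rw [ihk k hk]
        have hget : PySem.List.pyGetD (c.set m.toNat (PySem.List.pyGetD c m 0 + 1)) k 0
            = if k = m then PySem.List.pyGetD c m 0 + 1 else PySem.List.pyGetD c k 0 := by
          by_cases hkm : k = m
          · rw [if_pos hkm, hkm, PySem.List.pyGetD_of_nonneg _ _ hm0]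
            simp [List.getD_eq_getElem?_getD, hmlt]
          · rw [if_neg hkm, PySem.List.pyGetD_of_nonneg _ _ hk, PySem.List.pyGetD_of_nonneg _ _ hk,
              List.getD_eq_getElem?_getD, List.getD_eq_getElem?_getD,
              List.getElem?_set_ne (by omega)]
        rw [hget]
        have hheadm : solveMval ((s : Int), x) = m := by simp [solveMval, hmdef]
        by_cases hkm : k = m
        · subst hkm
          rw [if_pos rfl, List.countP_cons, if_pos (by simp [hheadm, hm])]
          push_cast; omega
        · rw [if_neg hkm, List.countP_cons,
            if_neg (by simp [hheadm]; intro _; omega)]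
          simp
    · have hstep : solveCntStep (c, tot) ((s : Int), x) = (c, tot) := by
        simp [solveCntStep, hm]
      rw [hstep]
      obtain ⟨ihl, iht, ihk⟩ := ih (s+1) c tot (by simp [List.length_cons] at h; omega)
      have hhead : ¬ ((1:Int) ≤ solveMval ((s : Int), x)) := hm
      refine ⟨ihl, ?_, ?_⟩
      · rw [iht, List.countP_cons, if_neg (by simpa using hhead)]; simp
      · intro k hk
        rw [ihk k hk]
        simp only [List.countP_cons]
        rw [if_neg (by simp only [solveMval, decide_eq_true_eq, not_and]; intro hcon _; exact hm hcon)]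
        simp

lemma loopB_eq (a cnt : List Int)
    (hc : ∀ k : Int, 1 ≤ k → PySem.List.pyGetD cnt k 0
        = ((PySem.List.enumerate a ((0:Nat) : Int)).countP (fun p => decide (solveMval p = k)) : Int)) :
    ∀ (j i : Nat) (total : Int) (res : List Int), a.length - i ≤ j → 1 ≤ i →
    total = ((PySem.List.enumerate a ((0:Nat) : Int)).countP
        (fun p => decide ((i : Int) ≤ solveMval p)) : Int) →
    solveLoopB a.length i cnt total res = solveLoopPure a i res := by
  intro j
  induction j with
  | zero =>
    intro i total res hj hi ht
    rw [solveLoopB, solveLoopPure]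
    simp [Nat.not_lt.mpr (by omega : a.length ≤ i)]
  | succ j ih =>
    intro i total res hj hi ht
    rw [solveLoopB, solveLoopPure]
    by_cases hin : i < a.length
    · simp only [hin, if_pos]
      have hdrop := enumCount_drop a 0 i
      rw [Nat.sub_zero] at hdrop
      have htact : total = ((a.drop i).countP (fun t => decide ((i : Int) < t)) : Int) := by
        rw [ht, hdrop]
      by_cases hz : (a.drop i).countP (fun t => decide ((i : Int) < t)) = 0
      · rw [if_pos (by rw [htact, hz]; simp), if_pos hz]
      · rw [if_neg (by rw [htact]; exact_mod_cast hz), if_neg hz, htact]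
        apply ih (i+1) _ _ (by omega) (by omega)
        rw [← htact, ht, hc (i : Int) (by exact_mod_cast hi),
          count_mval_split (PySem.List.enumerate a ((0:Nat) : Int)) (i : Int)]
        have : ((i : Int) + 1) = ((i + 1 : Nat) : Int) := by push_cast; ring
        rw [this]
        push_cast
        ring
    · simp [hin]

-- ===== VERDICT (by name: the statement is the Claim_ definition above) =====
theorem solve_spec : Claim_equal_solve := by
  intro a _
  unfold Spec_solve
  have hz : ((0:Nat) : Int) = (0 : Int) := by norm_num
  have hA : solveLoopA a.length 1 a [(a.length : Int)] = solveLoopPure a 1 [(a.length : Int)] := by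
    apply loopA_eq a a.length 1 a _ (by omega) rfl
    have h1 : (((1:Nat) : Int) - 1) = 0 := by norm_num
    rw [h1]
    simp
  obtain ⟨hl, ht, hk⟩ := foldB_spec a 0 (List.replicate (a.length + 1) 0) 0 (by simp)
  rw [hz] at hl ht hk
  have hB : solveLoopB a.length 1
      ((PySem.List.enumerate a 0).foldl solveCntStep (List.replicate (a.length + 1) 0, 0)).1
      ((PySem.List.enumerate a 0).foldl solveCntStep (List.replicate (a.length + 1) 0, 0)).2
      [(a.length : Int)] = solveLoopPure a 1 [(a.length : Int)] := by
    refine loopB_eq a _ ?_ a.length 1 _ _ (by omega) (by omega) ?_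
    · intro k hk1
      rw [hz, hk k (by omega)]
      have hrep : PySem.List.pyGetD (List.replicate (a.length + 1) (0:Int)) k 0 = 0 := by
        rw [PySem.List.pyGetD_of_nonneg _ _ (by omega)]
        simp
      rw [hrep]
      have hiff : ∀ p ∈ PySem.List.enumerate a (0:Int),
          (decide ((1:Int) ≤ solveMval p ∧ solveMval p = k) = true
            ↔ decide (solveMval p = k) = true) := by
        intro p _
        by_cases hpk : solveMval p = k
        · simp [hpk]; omega
        · simp [hpk]
      rw [List.countP_congr hiff]
      simp
    · rw [hz, ht]
      norm_num
  show solveLoopA a.length 1 a [(a.length : Int)] = _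
  rw [hA]
  show _ = solveLoopB a.length 1 _ _ [(a.length : Int)]
  rw [hB]
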